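-- pv_equiv track=rewrite | github.com/mahadir04/islamic-agent | Backend/app/agent.py | _is_inappropriate_question
-- ===== SOURCE A (Python) =====
-- def _is_inappropriate_question(question: str) -> bool:
--     inappropriate_keywords = [
--         'porn', 'xxx', 'adult', 'explicit', 'nude', 'sexually explicit',
--         'illegal activities', 'criminal instructions', 'violence instructions',
--         'hate speech', 'discrimination', 'blasphemy', 'disrespect prophet',
--         'disrespect quran', 'terrorism', 'extremism'
--     ]
--
--     question_lower = question.lower()
--     return any(keyword in question_lower for keyword in inappropriate_keywords)
-- ===== SOURCE B (Python) =====
-- def _is_inappropriate_question(question: str) -> bool: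
--     keywords = [
--         'porn', 'xxx', 'adult', 'explicit', 'nude', 'sexually explicit',
--         'illegal activities', 'criminal instructions', 'violence instructions',
--         'hate speech', 'discrimination', 'blasphemy', 'disrespect prophet',
--         'disrespect quran', 'terrorism', 'extremism'
--     ]
--     q = question.lower()
--     for i in range(len(q) + 1):
--         if any(q.startswith(kw, i) for kw in keywords):
--             return True
--     return False
-- ===== Notes on version B (the rewrite author's own statement) =====
-- stated objective: alternative
-- what changed: Replaces the keyword-driven loop of substring containment tests with a single position-driven scan of the lowered text, testing at each position whether any keyword starts there.
import Mathlib
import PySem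

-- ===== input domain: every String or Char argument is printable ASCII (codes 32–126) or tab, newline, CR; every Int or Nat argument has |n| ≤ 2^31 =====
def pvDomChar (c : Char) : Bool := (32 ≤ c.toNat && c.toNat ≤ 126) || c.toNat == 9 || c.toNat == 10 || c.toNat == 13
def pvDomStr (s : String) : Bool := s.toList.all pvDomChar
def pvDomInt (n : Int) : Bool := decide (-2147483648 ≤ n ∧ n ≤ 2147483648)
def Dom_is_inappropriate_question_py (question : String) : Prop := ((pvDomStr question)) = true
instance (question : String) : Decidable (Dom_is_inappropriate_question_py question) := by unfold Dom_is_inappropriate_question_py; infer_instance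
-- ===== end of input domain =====

-- B replaces the keyword-by-keyword substring loop with one position-by-position scan of the
-- lowered text, testing at each position whether any keyword starts there (objective: alternative).

def pvKeywords : List String :=
  ["porn", "xxx", "adult", "explicit", "nude", "sexually explicit",
   "illegal activities", "criminal instructions", "violence instructions",
   "hate speech", "discrimination", "blasphemy", "disrespect prophet",
   "disrespect quran", "terrorism", "extremism"]

-- ===== PORT A =====
-- any(keyword in question_lower for keyword in inappropriate_keywords)
def is_inappropriate_question_py (question : String) : Bool :=
  let question_lower := PySem.Str.lower question
  pvKeywords.any (fun keyword => PySem.Str.isIn keyword question_lower)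

-- ===== PORT B =====
-- for i in range(len(q)+1): if any(q.startswith(kw, i) for kw in keywords): return True
-- ported as structural recursion over the suffixes q.drop i (i = 0 … len q)
def pvScan (kws : List String) : List Char → Bool
  | [] => kws.any (fun kw => PySem.Chars.startswith [] kw.toList)
  | c :: t => kws.any (fun kw => PySem.Chars.startswith (c :: t) kw.toList) || pvScan kws t

def is_inappropriate_question_py_alt (question : String) : Bool :=
  pvScan pvKeywords (PySem.Str.lower question).toList

-- ===== PRECONDITION & SPEC =====
def Spec_is_inappropriate_question_py (question : String) (out : Bool) : Prop := out = is_inappropriate_question_py_alt question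
instance (question : String) (out : Bool) : Decidable (Spec_is_inappropriate_question_py question out) := by unfold Spec_is_inappropriate_question_py; infer_instance

-- ===== CLAIM (what is proved, stated in full; the proofs are below) =====
def Claim_equal_is_inappropriate_question_py : Prop := ∀ (question : String), Dom_is_inappropriate_question_py question → Spec_is_inappropriate_question_py question (is_inappropriate_question_py question)

-- ===== LEMMAS AND PROOFS =====

-- the position scan finds exactly the keywords occurring as infixes of the text
theorem pvScan_eq_any_isIn (kws : List String) (s : List Char) :
    pvScan kws s = kws.any (fun kw => PySem.Chars.isIn kw.toList s) := by
  induction s with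
  | nil =>
      rw [Bool.eq_iff_iff]
      simp [pvScan, List.any_eq_true, PySem.Chars.startswith_iff, PySem.Chars.isIn_iff_infix,
        List.prefix_nil, List.infix_nil]
  | cons c t ih =>
      rw [Bool.eq_iff_iff]
      simp only [pvScan, ih, Bool.or_eq_true, List.any_eq_true,
        PySem.Chars.startswith_iff, PySem.Chars.isIn_iff_infix, List.infix_cons_iff]
      constructor
      · rintro (⟨k, hk, h⟩ | ⟨k, hk, h⟩)
        · exact ⟨k, hk, Or.inl h⟩
        · exact ⟨k, hk, Or.inr h⟩
      · rintro ⟨k, hk, h | h⟩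
        · exact Or.inl ⟨k, hk, h⟩
        · exact Or.inr ⟨k, hk, h⟩

-- ===== VERDICT (by name: the statement is the Claim_ definition above) =====
theorem is_inappropriate_question_py_spec : Claim_equal_is_inappropriate_question_py := by
  intro question _
  unfold Spec_is_inappropriate_question_py
  unfold is_inappropriate_question_py is_inappropriate_question_py_alt
  rw [pvScan_eq_any_isIn]
  exact congrArg _ (funext fun kw => by simp [PySem.Str.isIn_eq])
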